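-- pv_equiv track=rewrite | github.com/abko27700/Police_incident_analyzer | dbOperations.py | assign_location_rankings
-- ===== SOURCE A (Python) =====
-- def assign_location_rankings(sorted_locations):
--     rankings = {}
--     rank = 1
--     prev_freq = None
--     for i, (location, freq) in enumerate(sorted_locations):
--         if freq != prev_freq:
--             rank = i + 1
--         rankings[location] = rank
--         prev_freq = freq
--     return rankings
-- ===== SOURCE B (Python) =====
-- def assign_location_rankings(sorted_locations):
--     # Group-wise traversal: find each maximal run of equal frequency, assign one rank per run.
--     rankings = {}
--     n = len(sorted_locations)
--     i = 0
--     while i < n: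
--         freq = sorted_locations[i][1]
--         j = i + 1
--         while j < n and sorted_locations[j][1] == freq:
--             j += 1
--         rank = i + 1
--         for k in range(i, j):
--             rankings[sorted_locations[k][0]] = rank
--         i = j
--     return rankings
-- ===== Notes on version B (the rewrite author's own statement) =====
-- stated objective: alternative
-- what changed: Replaces A's element-wise enumerate scan carrying rank/prev_freq state with a group-oriented traversal that finds each maximal run of equal frequency and assigns one rank per run.
import Mathlib
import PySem

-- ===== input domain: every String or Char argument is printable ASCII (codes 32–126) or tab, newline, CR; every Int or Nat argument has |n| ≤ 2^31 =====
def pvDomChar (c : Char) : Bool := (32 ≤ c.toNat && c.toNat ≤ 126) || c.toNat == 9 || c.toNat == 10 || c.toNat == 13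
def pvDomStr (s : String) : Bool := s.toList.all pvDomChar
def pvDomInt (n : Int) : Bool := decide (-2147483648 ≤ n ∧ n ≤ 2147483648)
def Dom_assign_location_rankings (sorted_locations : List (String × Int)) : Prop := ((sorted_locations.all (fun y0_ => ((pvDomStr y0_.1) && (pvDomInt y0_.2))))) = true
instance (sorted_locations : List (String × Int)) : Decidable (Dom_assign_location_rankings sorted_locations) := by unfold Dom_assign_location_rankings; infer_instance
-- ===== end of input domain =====

-- B replaces A's element-wise scan (rank/prev_freq state) with a group-oriented traversal
-- over maximal runs of equal frequency; same cost, alternative structure.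


-- ===== PORT A =====
-- the for-loop over enumerate(sorted_locations) as structural recursion carrying (i, rank, prev_freq, rankings)
def pvAGo : List (String × Int) → Int → Int → Option Int → PySem.Dict String Int → PySem.Dict String Int
  | [], _, _, _, d => d
  | (location, freq) :: rest, i, rank, prev, d =>
      let rank' := if prev ≠ some freq then i + 1 else rank
      pvAGo rest (i + 1) rank' (some freq) (d.insert location rank')

def assign_location_rankings (sorted_locations : List (String × Int)) : List (String × Int) :=
  (pvAGo sorted_locations 0 1 none PySem.Dict.empty).items

-- ===== PORT B =====
-- the outer while-loop: take the maximal run of the head's frequency, assign rank i+1 to the run, continue after it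
def pvBGo : List (String × Int) → Int → PySem.Dict String Int → PySem.Dict String Int
  | [], _, d => d
  | (location, freq) :: rest, i, d =>
      let run := rest.takeWhile (fun p => p.2 == freq)
      let rem := rest.dropWhile (fun p => p.2 == freq)
      pvBGo rem (i + 1 + run.length) (run.foldl (fun d p => d.insert p.1 (i + 1)) (d.insert location (i + 1)))
  termination_by xs => xs.length
  decreasing_by
    simp only [List.length_cons]
    exact Nat.lt_succ_of_le (List.length_dropWhile_le _ _)

def assign_location_rankings_alt (sorted_locations : List (String × Int)) : List (String × Int) :=
  (pvBGo sorted_locations 0 PySem.Dict.empty).items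

-- ===== PRECONDITION & SPEC =====
def Spec_assign_location_rankings (sorted_locations : List (String × Int)) (out : List (String × Int)) : Prop := out = assign_location_rankings_alt sorted_locations
instance (sorted_locations : List (String × Int)) (out : List (String × Int)) : Decidable (Spec_assign_location_rankings sorted_locations out) := by unfold Spec_assign_location_rankings; infer_instance

-- ===== CLAIM (what is proved, stated in full; the proofs are below) =====
def Claim_equal_assign_location_rankings : Prop := ∀ (sorted_locations : List (String × Int)), Dom_assign_location_rankings sorted_locations → Spec_assign_location_rankings sorted_locations (assign_location_rankings sorted_locations)

-- ===== LEMMAS AND PROOFS =====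

-- inside a run of the current frequency, A keeps its rank and just inserts, reaching the end of the run
theorem pvA_run (rest : List (String × Int)) : ∀ (freq j rank : Int) (d : PySem.Dict String Int),
    pvAGo rest j rank (some freq) d =
    pvAGo (rest.dropWhile (fun p => p.2 == freq)) (j + (rest.takeWhile (fun p => p.2 == freq)).length)
      rank (some freq) ((rest.takeWhile (fun p => p.2 == freq)).foldl (fun d p => d.insert p.1 rank) d) := by
  induction rest with
  | nil => intro freq j rank d; simp [pvAGo]
  | cons hd tl ih =>
    intro freq j rank d
    obtain ⟨l, f⟩ := hd
    by_cases hf : f = freq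
    · subst hf
      simp only [List.takeWhile_cons, List.dropWhile_cons, beq_self_eq_true, if_true,
        List.length_cons, List.foldl_cons]
      rw [pvAGo]
      simp only [ne_eq, not_true_eq_false, if_false]
      rw [ih]
      congr 1
      push_cast
      ring
    · have hb : (f == freq) = false := by simp [hf]
      simp [hb]

theorem head?_dropWhile_false {α : Type} (p : α → Bool) (l : List α) (x : α)
    (h : (l.dropWhile p).head? = some x) : p x = false := by
  induction l with
  | nil => simp [List.dropWhile] at h
  | cons hd tl ih =>
    rw [List.dropWhile_cons] at h
    by_cases hp : p hd
    · simp [hp] at h; exact ih h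
    · simp [hp] at h
      rw [← h]
      exact Bool.eq_false_iff.mpr hp

theorem pvAB (n : Nat) : ∀ (xs : List (String × Int)), xs.length ≤ n →
    ∀ (i rank : Int) (prev : Option Int) (d : PySem.Dict String Int),
    (∀ p, xs.head? = some p → prev ≠ some p.2) →
    pvAGo xs i rank prev d = pvBGo xs i d := by
  induction n with
  | zero =>
    intro xs hlen i rank prev d _
    have : xs = [] := List.eq_nil_of_length_eq_zero (Nat.le_zero.mp hlen)
    subst this; simp [pvAGo, pvBGo]
  | succ n ih =>
    intro xs hlen i rank prev d h
    match xs with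
    | [] => simp [pvAGo, pvBGo]
    | (l, f) :: t =>
      have hne : prev ≠ some f := h (l, f) rfl
      rw [pvAGo]
      simp only [ne_eq, hne, not_false_eq_true, if_true]
      rw [pvA_run]
      rw [pvBGo]
      have hlen' : (t.dropWhile (fun p => p.2 == f)).length ≤ n := by
        have h1 := List.length_dropWhile_le (fun (p : String × Int) => p.2 == f) t
        simp only [List.length_cons] at hlen
        omega
      have hh : ∀ p, ((t.dropWhile (fun p => p.2 == f)).head? = some p) → (some f : Option Int) ≠ some p.2 := by
        intro p hp hc
        have hfalse := head?_dropWhile_false _ _ _ hp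
        injection hc with h'
        rw [← h'] at hfalse
        simp at hfalse
      rw [ih _ hlen' _ _ _ _ hh]

-- ===== VERDICT (by name: the statement is the Claim_ definition above) =====
theorem assign_location_rankings_spec : Claim_equal_assign_location_rankings := by
  intro xs _
  unfold Spec_assign_location_rankings assign_location_rankings assign_location_rankings_alt
  rw [pvAB xs.length xs (le_refl _) 0 1 none PySem.Dict.empty]
  intro p _ hc
  simp at hc
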